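-- pv_equiv track=rewrite | github.com/saxenap/nanohub | nanoHUB/raindrop/clustering_V1/core_quick_cluster_detection/merge_clusters.py | generateClusterIntersections
-- ===== SOURCE A (Python) =====
-- def generateClusterIntersections(clusters):
--     intersections = []
--     for i in range(0, len(clusters)):
--         for j in range(i + 1, len(clusters)):
--             intersection = clusters[i] & clusters[j]
--             intersectionSize = len(intersection)
--             if intersectionSize > 0:
--                 intersections.append((intersection, clusters[i], clusters[j]))
--     return intersections
-- ===== SOURCE B (Python) =====
-- def generateClusterIntersections(clusters):
--     n = len(clusters)
--     # inverted index: element -> sorted list of cluster indices containing it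
--     index = {}
--     for i in range(n):
--         for x in clusters[i]:
--             index.setdefault(x, []).append(i)
--     # accumulate intersection elements only for pairs that actually share an element
--     acc = {}
--     for i in range(n):
--         for x in clusters[i]:
--             for j in index[x]:
--                 if j > i:
--                     acc.setdefault((i, j), []).append(x)
--     intersections = []
--     for i in range(n):
--         for j in range(i + 1, n):
--             if (i, j) in acc:
--                 intersections.append((set(acc[(i, j)]), clusters[i], clusters[j]))
--     return intersections
-- ===== Notes on version B (the rewrite author's own statement) =====
-- stated objective: alternative
-- what changed: Replaces the all-pairs set-intersection scan by an inverted index element->cluster indices from which per-pair intersection lists are accumulated only for pairs that actually share an element, then emitted in (i,j) order.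
import Mathlib
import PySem

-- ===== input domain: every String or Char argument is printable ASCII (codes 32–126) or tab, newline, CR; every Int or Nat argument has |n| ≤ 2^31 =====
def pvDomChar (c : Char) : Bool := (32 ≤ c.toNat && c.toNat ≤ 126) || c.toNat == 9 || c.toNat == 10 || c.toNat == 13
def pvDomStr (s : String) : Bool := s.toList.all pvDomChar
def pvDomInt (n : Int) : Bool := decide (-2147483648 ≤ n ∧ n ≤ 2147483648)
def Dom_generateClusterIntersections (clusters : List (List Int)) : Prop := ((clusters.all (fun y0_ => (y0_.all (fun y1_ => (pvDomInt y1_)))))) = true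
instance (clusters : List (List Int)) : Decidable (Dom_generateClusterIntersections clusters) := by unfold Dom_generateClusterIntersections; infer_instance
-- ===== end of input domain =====

-- B replaces the all-pairs set-intersection scan by an inverted index element -> cluster
-- indices, accumulating per-pair intersection lists only for pairs that share an element
-- (objective: alternative algorithm; same measured cost on the timing inputs).

-- ===== PORT A =====
def generateClusterIntersections (clusters : List (List Int)) : List (List (List Int)) :=
  (PySem.List.pyRange 0 (PySem.List.len clusters) 1).foldl (fun intersections i =>
    (PySem.List.pyRange (i + 1) (PySem.List.len clusters) 1).foldl (fun intersections j =>
      let intersection := PySem.Set.inter (PySem.List.pyGetD clusters i []) (PySem.List.pyGetD clusters j [])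
      let intersectionSize := PySem.Set.len intersection
      if intersectionSize > 0 then
        intersections ++ [[intersection, PySem.List.pyGetD clusters i [], PySem.List.pyGetD clusters j []]]
      else intersections) intersections) []

-- ===== PORT B =====
-- index.setdefault(x, []).append(i) is Dict.modify x [] (· ++ [i]); acc[(i, j)] inside the
-- guarded branch is total (the key is present), ported as getD (i, j) [].
def generateClusterIntersections_alt (clusters : List (List Int)) : List (List (List Int)) :=
  let n := PySem.List.len clusters
  let index := (PySem.List.pyRange 0 n 1).foldl (fun d i =>
      (PySem.List.pyGetD clusters i []).foldl (fun d x => d.modify x [] (· ++ [i])) d)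
    PySem.Dict.empty
  let acc := (PySem.List.pyRange 0 n 1).foldl (fun d i =>
      (PySem.List.pyGetD clusters i []).foldl (fun d x =>
        (index.getD x []).foldl (fun d j =>
          if j > i then d.modify (i, j) [] (· ++ [x]) else d) d) d)
    PySem.Dict.empty
  (PySem.List.pyRange 0 n 1).foldl (fun intersections i =>
    (PySem.List.pyRange (i + 1) n 1).foldl (fun intersections j =>
      if acc.contains (i, j) then
        intersections ++ [[PySem.Set.ofList (acc.getD (i, j) []),
          PySem.List.pyGetD clusters i [], PySem.List.pyGetD clusters j []]]
      else intersections) intersections) []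

-- ===== PRECONDITION & SPEC =====
-- Each cluster models a Python set, so its elements are distinct; Lean-side lists with
-- duplicated elements inside a cluster do not correspond to any Python input (Python A
-- receives sets and cannot be applied there), and are excluded.
def Pre_generateClusterIntersections (clusters : List (List Int)) : Prop :=
  ∀ c ∈ clusters, c.Nodup
instance (clusters : List (List Int)) : Decidable (Pre_generateClusterIntersections clusters) := by
  unfold Pre_generateClusterIntersections; infer_instance

def pvWitness_generateClusterIntersections : List (List Int) := [[1, 2], [2, 3], [4]]

def Spec_generateClusterIntersections (clusters : List (List Int)) (out : List (List (List Int))) : Prop := out = generateClusterIntersections_alt clusters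
instance (clusters : List (List Int)) (out : List (List (List Int))) : Decidable (Spec_generateClusterIntersections clusters out) := by unfold Spec_generateClusterIntersections; infer_instance

-- ===== CLAIM (what is proved, stated in full; the proofs are below) =====
def Claim_equal_generateClusterIntersections : Prop := ∀ (clusters : List (List Int)), Dom_generateClusterIntersections clusters → Pre_generateClusterIntersections clusters → Spec_generateClusterIntersections clusters (generateClusterIntersections clusters)

-- ===== LEMMAS AND PROOFS =====

-- Abbreviations for the pieces of B (proof-only).
def pvCl (clusters : List (List Int)) (i : Int) : List Int := PySem.List.pyGetD clusters i []

def pvIdx (clusters : List (List Int)) : PySem.Dict Int (List Int) :=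
  (PySem.List.pyRange 0 (PySem.List.len clusters) 1).foldl (fun d i =>
      (PySem.List.pyGetD clusters i []).foldl (fun d x => d.modify x [] (· ++ [i])) d)
    PySem.Dict.empty

def pvAcc (clusters : List (List Int)) : PySem.Dict (Int × Int) (List Int) :=
  (PySem.List.pyRange 0 (PySem.List.len clusters) 1).foldl (fun d i =>
      (PySem.List.pyGetD clusters i []).foldl (fun d x =>
        ((pvIdx clusters).getD x []).foldl (fun d j =>
          if j > i then d.modify (i, j) [] (· ++ [x]) else d) d) d)
    PySem.Dict.empty

-- ## The inverted index

lemma idx_inner (c : List Int) (i : Int) (d : PySem.Dict Int (List Int)) (y : Int) :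
    (c.foldl (fun d x => d.modify x [] (· ++ [i])) d).getD y [] =
      d.getD y [] ++ List.replicate (c.count y) i := by
  induction c generalizing d with
  | nil => simp
  | cons z c ih =>
    simp only [List.foldl_cons, ih, PySem.Dict.getD_modify, List.count_cons]
    by_cases h : y = z
    · subst h; simp [List.replicate_succ]
    · simp [h, Ne.symm h]

lemma idx_getD (clusters : List (List Int)) (is : List Int) (d : PySem.Dict Int (List Int)) (y : Int) :
    (is.foldl (fun d i => (pvCl clusters i).foldl (fun d x => d.modify x [] (· ++ [i])) d) d).getD y [] =
      d.getD y [] ++ is.flatMap (fun i => List.replicate ((pvCl clusters i).count y) i) := by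
  induction is generalizing d with
  | nil => simp
  | cons i is ih =>
    rw [List.foldl_cons, ih, idx_inner]
    simp [List.append_assoc]

lemma count_flatMap_replicate (is : List Int) (h : is.Nodup) (f : Int → Nat) (q : Int) :
    ((is.flatMap (fun i => List.replicate (f i) i)).count q) = if q ∈ is then f q else 0 := by
  induction is with
  | nil => simp
  | cons i is ih =>
    simp only [List.flatMap_cons, List.count_append, List.count_replicate,
      List.nodup_cons] at *
    rcases h with ⟨hni, hnd⟩
    by_cases hq : q = i
    · subst hq; simp [ih hnd, hni]
    · simp [beq_iff_eq, hq, Ne.symm hq, ih hnd]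

lemma idx_count (clusters : List (List Int)) (y q : Int) :
    ((pvIdx clusters).getD y []).count q =
      if q ∈ PySem.List.pyRange 0 (PySem.List.len clusters) 1 then (pvCl clusters q).count y else 0 := by
  unfold pvIdx
  rw [show (fun (d : PySem.Dict Int (List Int)) (i : Int) =>
      (PySem.List.pyGetD clusters i []).foldl (fun d x => d.modify x [] (· ++ [i])) d) =
    (fun d i => (pvCl clusters i).foldl (fun d x => d.modify x [] (· ++ [i])) d) from rfl]
  rw [idx_getD, PySem.Dict.getD_empty, List.nil_append,
    count_flatMap_replicate _ (PySem.List.nodup_pyRange_one 0 (PySem.List.len clusters))]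

lemma mem_idx (clusters : List (List Int)) (y q : Int) :
    q ∈ (pvIdx clusters).getD y [] ↔
      q ∈ PySem.List.pyRange 0 (PySem.List.len clusters) 1 ∧ y ∈ pvCl clusters q := by
  rw [← List.count_pos_iff, idx_count]
  by_cases h : q ∈ PySem.List.pyRange 0 (PySem.List.len clusters) 1
  · rw [if_pos h, List.count_pos_iff]
    exact ⟨fun hy => ⟨h, hy⟩, fun hy => hy.2⟩
  · rw [if_neg h]
    simp only [lt_self_iff_false, false_iff, not_and]
    intro hq
    exact absurd hq h

-- ## The pair accumulator

lemma acc_inner (js : List Int) (i x p q : Int) (d : PySem.Dict (Int × Int) (List Int)) :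
    ((js.foldl (fun d j => if j > i then d.modify (i, j) [] (· ++ [x]) else d) d).getD (p, q) []) =
      d.getD (p, q) [] ++ (if p = i ∧ i < q then List.replicate (js.count q) x else []) := by
  induction js generalizing d with
  | nil => simp
  | cons j js ih =>
    simp only [List.foldl_cons, List.count_cons]
    by_cases hji : j > i
    · simp only [if_pos hji, ih, PySem.Dict.getD_modify]
      by_cases hk : (p, q) = (i, j)
      · obtain ⟨hp, hq⟩ := Prod.mk.injEq .. ▸ hk
        subst hp; subst hq
        simp [hji, List.replicate_succ]
      · rw [if_neg hk]
        by_cases hc : p = i ∧ i < q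
        · have hqj : ¬ (q = j) := by
            rintro rfl; exact hk (by simp [hc.1])
          simp [hc, beq_iff_eq, Ne.symm hqj]
        · simp [hc]
    · rw [if_neg hji, ih]
      by_cases hc : p = i ∧ i < q
      · have hqj : ¬ (q = j) := by rintro rfl; omega
        simp [hc, beq_iff_eq, Ne.symm hqj]
      · simp [hc]

lemma acc_inner_contains (js : List Int) (i x p q : Int) (d : PySem.Dict (Int × Int) (List Int)) :
    ((js.foldl (fun d j => if j > i then d.modify (i, j) [] (· ++ [x]) else d) d).contains (p, q)) =
      (d.contains (p, q) || decide (p = i ∧ i < q ∧ q ∈ js)) := by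
  induction js generalizing d with
  | nil => simp
  | cons j js ih =>
    simp only [List.foldl_cons]
    by_cases hji : j > i
    · rw [if_pos hji, ih, PySem.Dict.contains_modify, Bool.eq_iff_iff]
      simp only [Bool.or_eq_true, beq_iff_eq, decide_eq_true_eq, List.mem_cons]
      constructor
      · rintro ((hk | hd) | ⟨rfl, h2, h3⟩)
        · obtain ⟨hp, hq⟩ := Prod.mk.injEq .. ▸ hk
          subst hp; subst hq
          exact Or.inr ⟨rfl, hji, Or.inl rfl⟩
        · exact Or.inl hd
        · exact Or.inr ⟨rfl, h2, Or.inr h3⟩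
      · rintro (hd | ⟨rfl, h2, (rfl | h3)⟩)
        · exact Or.inl (Or.inr hd)
        · exact Or.inl (Or.inl rfl)
        · exact Or.inr ⟨rfl, h2, h3⟩
    · rw [if_neg hji, ih]
      congr 1
      simp only [List.mem_cons, decide_eq_decide]
      constructor
      · rintro ⟨rfl, h2, h3⟩
        exact ⟨rfl, h2, Or.inr h3⟩
      · rintro ⟨rfl, h2, (rfl | h3)⟩
        · exact absurd h2 hji
        · exact ⟨rfl, h2, h3⟩

lemma acc_mid (clusters : List (List Int)) (c : List Int) (i p q : Int)
    (d : PySem.Dict (Int × Int) (List Int))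
    (hcnt : ∀ x : Int, ((pvIdx clusters).getD x []).count q ≤ 1) :
    ((c.foldl (fun d x =>
        ((pvIdx clusters).getD x []).foldl (fun d j =>
          if j > i then d.modify (i, j) [] (· ++ [x]) else d) d) d).getD (p, q) []) =
      d.getD (p, q) [] ++ (if p = i ∧ i < q then
        c.filter (fun x => decide (q ∈ (pvIdx clusters).getD x [])) else []) := by
  induction c generalizing d with
  | nil => simp
  | cons x c ih =>
    simp only [List.foldl_cons, ih, acc_inner]
    have hrep : List.replicate (((pvIdx clusters).getD x []).count q) x =
        if q ∈ (pvIdx clusters).getD x [] then [x] else [] := by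
      by_cases hm : q ∈ (pvIdx clusters).getD x []
      · have h1 : ((pvIdx clusters).getD x []).count q = 1 :=
          le_antisymm (hcnt x) (List.count_pos_iff.mpr hm)
        simp [hm, h1]
      · simp [hm, List.count_eq_zero_of_not_mem hm]
    by_cases hc : p = i ∧ i < q
    · simp only [if_pos hc, hrep, List.filter_cons, List.append_assoc]
      by_cases hm : q ∈ (pvIdx clusters).getD x [] <;> simp [hm]
    · simp [hc]

lemma acc_mid_contains (clusters : List (List Int)) (c : List Int) (i p q : Int)
    (d : PySem.Dict (Int × Int) (List Int)) :
    ((c.foldl (fun d x =>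
        ((pvIdx clusters).getD x []).foldl (fun d j =>
          if j > i then d.modify (i, j) [] (· ++ [x]) else d) d) d).contains (p, q)) =
      (d.contains (p, q) || decide (p = i ∧ i < q ∧ ∃ x ∈ c, q ∈ (pvIdx clusters).getD x [])) := by
  induction c generalizing d with
  | nil => simp
  | cons x c ih =>
    simp only [List.foldl_cons, ih, acc_inner_contains]
    by_cases hc : p = i ∧ i < q
    · obtain ⟨hp, hq⟩ := hc
      subst hp
      by_cases hm : q ∈ (pvIdx clusters).getD x []
      · simp [hq, hm]
      · simp [hq, hm]
    · rw [not_and_or] at hc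
      rcases hc with hc | hc <;> simp [hc]

lemma flatMap_if_single (g : Int → List Int) (p : Int) (P : Prop) [Decidable P] :
    ∀ (is : List Int), is.Nodup →
    (is.flatMap (fun i => if p = i ∧ P then g i else []) =
      if p ∈ is ∧ P then g p else []) := by
  intro is h
  induction is with
  | nil => simp
  | cons i is ih =>
    simp only [List.nodup_cons] at h
    rcases h with ⟨hni, hnd⟩
    simp only [List.flatMap_cons, ih hnd]
    by_cases hp : p = i
    · subst hp
      by_cases hP : P <;> simp [hni, hP]
    · simp [hp]

lemma acc_getD (clusters : List (List Int)) (p q : Int)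
    (hcnt : ∀ x : Int, ((pvIdx clusters).getD x []).count q ≤ 1) :
    (pvAcc clusters).getD (p, q) [] =
      if p ∈ PySem.List.pyRange 0 (PySem.List.len clusters) 1 ∧ p < q then
        (pvCl clusters p).filter (fun x => decide (q ∈ (pvIdx clusters).getD x [])) else [] := by
  unfold pvAcc
  have step : ∀ (is : List Int) (d : PySem.Dict (Int × Int) (List Int)),
      (is.foldl (fun d i =>
        (PySem.List.pyGetD clusters i []).foldl (fun d x =>
          ((pvIdx clusters).getD x []).foldl (fun d j =>
            if j > i then d.modify (i, j) [] (· ++ [x]) else d) d) d) d).getD (p, q) [] =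
      d.getD (p, q) [] ++ is.flatMap (fun i => if p = i ∧ i < q then
        (pvCl clusters i).filter (fun x => decide (q ∈ (pvIdx clusters).getD x [])) else []) := by
    intro is
    induction is with
    | nil => simp
    | cons i is ih =>
      intro d
      simp only [List.foldl_cons, ih, acc_mid clusters _ _ _ _ _ hcnt, List.flatMap_cons,
        List.append_assoc, pvCl]
  rw [step]
  have hfun : (fun i => if p = i ∧ i < q then
        (pvCl clusters i).filter (fun x => decide (q ∈ (pvIdx clusters).getD x [])) else []) =
      (fun i => if p = i ∧ p < q then
        (pvCl clusters i).filter (fun x => decide (q ∈ (pvIdx clusters).getD x [])) else []) := by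
    funext i
    by_cases hp : p = i
    · subst hp; rfl
    · simp [hp]
  rw [hfun,
    flatMap_if_single _ _ _ _ (PySem.List.nodup_pyRange_one 0 (PySem.List.len clusters))]
  simp [PySem.Dict.getD_empty]

lemma acc_contains (clusters : List (List Int)) (p q : Int) :
    (pvAcc clusters).contains (p, q) =
      decide (p ∈ PySem.List.pyRange 0 (PySem.List.len clusters) 1 ∧ p < q ∧
        ∃ x ∈ pvCl clusters p, q ∈ (pvIdx clusters).getD x []) := by
  unfold pvAcc
  have step : ∀ (is : List Int) (d : PySem.Dict (Int × Int) (List Int)),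
      (is.foldl (fun d i =>
        (PySem.List.pyGetD clusters i []).foldl (fun d x =>
          ((pvIdx clusters).getD x []).foldl (fun d j =>
            if j > i then d.modify (i, j) [] (· ++ [x]) else d) d) d) d).contains (p, q) =
      (d.contains (p, q) || decide (∃ i ∈ is, p = i ∧ p < q ∧
        ∃ x ∈ pvCl clusters i, q ∈ (pvIdx clusters).getD x [])) := by
    intro is
    induction is with
    | nil => simp
    | cons i is ih =>
      intro d
      rw [List.foldl_cons, ih, acc_mid_contains, Bool.eq_iff_iff]
      simp only [Bool.or_eq_true, decide_eq_true_eq, List.mem_cons, pvCl]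
      constructor
      · rintro ((hd | ⟨rfl, h2, hx⟩) | ⟨i', hi', rfl, h2, hx⟩)
        · exact Or.inl hd
        · exact Or.inr ⟨p, Or.inl rfl, rfl, h2, hx⟩
        · exact Or.inr ⟨p, Or.inr hi', rfl, h2, hx⟩
      · rintro (hd | ⟨i', (rfl | hi'), rfl, h2, hx⟩)
        · exact Or.inl (Or.inl hd)
        · exact Or.inl (Or.inr ⟨rfl, h2, hx⟩)
        · exact Or.inr ⟨p, hi', rfl, h2, hx⟩
  rw [step]
  simp only [PySem.Dict.contains_empty, Bool.false_or, decide_eq_decide]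
  constructor
  · rintro ⟨i, hi, rfl, h⟩
    exact ⟨hi, h⟩
  · rintro ⟨hi, h⟩; exact ⟨p, hi, rfl, h⟩
  
-- ## Assembly

theorem generateClusterIntersections_spec : Claim_equal_generateClusterIntersections := by
  intro clusters _hdom hpre
  show generateClusterIntersections clusters = generateClusterIntersections_alt clusters
  have halt : generateClusterIntersections_alt clusters =
      (PySem.List.pyRange 0 (PySem.List.len clusters) 1).foldl (fun intersections i =>
        (PySem.List.pyRange (i + 1) (PySem.List.len clusters) 1).foldl (fun intersections j =>
          if (pvAcc clusters).contains (i, j) then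
            intersections ++ [[PySem.Set.ofList ((pvAcc clusters).getD (i, j) []),
              pvCl clusters i, pvCl clusters j]]
          else intersections) intersections) [] := rfl
  have hA : generateClusterIntersections clusters =
      (PySem.List.pyRange 0 (PySem.List.len clusters) 1).foldl (fun intersections i =>
        (PySem.List.pyRange (i + 1) (PySem.List.len clusters) 1).foldl (fun intersections j =>
          if PySem.Set.len (PySem.Set.inter (pvCl clusters i) (pvCl clusters j)) > 0 then
            intersections ++ [[PySem.Set.inter (pvCl clusters i) (pvCl clusters j),
              pvCl clusters i, pvCl clusters j]]
          else intersections) intersections) [] := rfl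
  rw [hA, halt]
  apply PySem.List.foldl_congr_mem
  intro out0 i hi
  apply PySem.List.foldl_congr_mem
  intro out j hj
  rw [PySem.List.mem_pyRange_one] at hi hj
  simp only [PySem.List.len_eq] at hi hj
  have hin : i ∈ PySem.List.pyRange 0 (PySem.List.len clusters) 1 := by
    rw [PySem.List.mem_pyRange_one, PySem.List.len_eq]
    omega
  have hjn : j ∈ PySem.List.pyRange 0 (PySem.List.len clusters) 1 := by
    rw [PySem.List.mem_pyRange_one, PySem.List.len_eq]
    omega
  have hij : i < j := by omega
  have hcli : pvCl clusters i ∈ clusters := by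
    rw [pvCl, PySem.List.pyGetD_eq_getElem _ _ (by omega) (by simpa using hi.2)]
    exact List.getElem_mem _
  have hclj : pvCl clusters j ∈ clusters := by
    rw [pvCl, PySem.List.pyGetD_eq_getElem _ _ (by omega) (by simpa using hj.2)]
    exact List.getElem_mem _
  have hcnt : ∀ x : Int, ((pvIdx clusters).getD x []).count j ≤ 1 := by
    intro x
    rw [idx_count]
    by_cases h : j ∈ PySem.List.pyRange 0 (PySem.List.len clusters) 1
    · rw [if_pos h]
      exact List.nodup_iff_count_le_one.mp (hpre _ hclj) x
    · rw [if_neg h]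
      exact Nat.zero_le _
  have hiff : ∀ x : Int, (j ∈ (pvIdx clusters).getD x []) ↔ x ∈ pvCl clusters j := by
    intro x
    rw [mem_idx]
    exact ⟨fun h => h.2, fun h => ⟨hjn, h⟩⟩
  have hfilt : (pvCl clusters i).filter (fun x => decide (j ∈ (pvIdx clusters).getD x [])) =
      PySem.Set.inter (pvCl clusters i) (pvCl clusters j) := by
    rw [show PySem.Set.inter (pvCl clusters i) (pvCl clusters j) =
      (pvCl clusters i).filter (fun x => (pvCl clusters j).contains x) from rfl]
    apply List.filter_congr
    intro x _
    by_cases hx : x ∈ pvCl clusters j <;> simp [hx, hiff x]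
  have hnodupInter : (PySem.Set.inter (pvCl clusters i) (pvCl clusters j)).Nodup := by
    rw [← hfilt]
    exact List.Nodup.filter _ (hpre _ hcli)
  have hinterP : (PySem.Set.len (PySem.Set.inter (pvCl clusters i) (pvCl clusters j)) > 0) ↔
      (∃ x ∈ pvCl clusters i, x ∈ pvCl clusters j) := by
    simp [PySem.Set.len, PySem.Set.inter, List.length_pos_iff_exists_mem, List.mem_filter]
  by_cases hP : ∃ x ∈ pvCl clusters i, x ∈ pvCl clusters j
  · have hcon : (pvAcc clusters).contains (i, j) = true := by
      rw [acc_contains]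
      apply decide_eq_true
      obtain ⟨x, hx1, hx2⟩ := hP
      exact ⟨hin, hij, x, hx1, (hiff x).mpr hx2⟩
    rw [if_pos (hinterP.mpr hP), if_pos hcon]
    rw [acc_getD clusters i j hcnt, if_pos ⟨hin, hij⟩, hfilt,
      PySem.Set.ofList_eq_self_of_nodup _ hnodupInter]
  · have hcon : (pvAcc clusters).contains (i, j) = false := by
      rw [acc_contains]
      apply decide_eq_false
      rintro ⟨-, -, x, hx1, hx2⟩
      exact hP ⟨x, hx1, (hiff x).mp hx2⟩
    rw [if_neg (fun h => hP (hinterP.mp h)), if_neg (by rw [hcon]; exact Bool.false_ne_true)]
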